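-- pv_equiv track=rewrite | github.com/Leapense/problems | 13270번： 피보나치 치킨/피보나치 치킨.py | fibonacci_sets
-- ===== SOURCE A (Python) =====
-- def fibonacci_sets(N):
--     sets = []
--     a, b = 2, 1
--     while a <= N:
--         if a > b:
--             sets.append((a, b))
--
--         a, b = a + b, a
--     return sets
-- ===== SOURCE B (Python) =====
-- def fibonacci_sets(N):
--     def fibs_upto(x, y):
--         # ascending Fibonacci chain starting x, y; keep values <= N
--         if y > N:
--             return [x]
--         return [x] + fibs_upto(y, x + y)
--
--     nums = fibs_upto(1, 2)
--     return list(zip(nums[1:], nums[:-1]))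
-- ===== Notes on version B (the rewrite author's own statement) =====
-- stated objective: alternative
-- what changed: B recursively builds the full Fibonacci list up to N and then pairs each element with its predecessor via zip(nums[1:], nums[:-1]), instead of A's single imperative loop that appends a pair per iteration.
import Mathlib
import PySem

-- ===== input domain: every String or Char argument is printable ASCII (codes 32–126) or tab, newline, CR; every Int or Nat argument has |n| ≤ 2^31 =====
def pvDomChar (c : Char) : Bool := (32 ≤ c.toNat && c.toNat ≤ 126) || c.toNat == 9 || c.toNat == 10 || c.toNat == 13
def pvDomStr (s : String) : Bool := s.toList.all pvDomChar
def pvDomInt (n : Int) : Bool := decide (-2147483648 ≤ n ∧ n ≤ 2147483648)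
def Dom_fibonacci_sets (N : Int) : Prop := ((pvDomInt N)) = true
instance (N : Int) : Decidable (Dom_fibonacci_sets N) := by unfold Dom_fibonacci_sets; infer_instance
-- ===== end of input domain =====

-- B builds the Fibonacci list and pairs it afterwards; A appends one pair per loop step. Objective: alternative decomposition.

-- ===== PORT A =====
-- the while loop of A; the proof arguments 0 < b < a make Python's (terminating) loop well-founded
def fibLoopA (N a b : Int) (hb : 0 < b) (hab : b < a) : List (Int × Int) :=
  if _h : a ≤ N then
    (if a > b then [(a, b)] else []) ++ fibLoopA N (a + b) a (by omega) (by omega)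
  else []
termination_by (N + 1 - a).toNat
decreasing_by omega

def fibonacci_sets (N : Int) : List (Int × Int) := fibLoopA N 2 1 (by norm_num) (by norm_num)

-- ===== PORT B =====
-- B's recursive helper fibs_upto(x, y)
def fibsUpto (N x y : Int) (hx : 0 < x) (hxy : x < y) : List Int :=
  if _h : y > N then [x]
  else [x] ++ fibsUpto N y (x + y) (hx.trans hxy) (by omega)
termination_by (N + 1 - y).toNat
decreasing_by omega

def fibonacci_sets_alt (N : Int) : List (Int × Int) :=
  let nums := fibsUpto N 1 2 (by norm_num) (by norm_num)
  List.zip (PySem.List.slice nums (some 1) none) (PySem.List.slice nums none (some (-1)))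

-- ===== PRECONDITION & SPEC =====
def Spec_fibonacci_sets (N : Int) (out : List (Int × Int)) : Prop := out = fibonacci_sets_alt N
instance (N : Int) (out : List (Int × Int)) : Decidable (Spec_fibonacci_sets N out) := by unfold Spec_fibonacci_sets; infer_instance

-- ===== CLAIM (what is proved, stated in full; the proofs are below) =====
def Claim_equal_fibonacci_sets : Prop := ∀ (N : Int), Dom_fibonacci_sets N → Spec_fibonacci_sets N (fibonacci_sets N)

-- ===== LEMMAS AND PROOFS =====

theorem fibsUpto_head (N x y : Int) (hx : 0 < x) (hxy : x < y) :
    ∃ t, fibsUpto N x y hx hxy = x :: t := by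
  unfold fibsUpto
  split <;> exact ⟨_, rfl⟩

-- zip truncates at the shorter list, so a dropLast on the longer side is invisible
theorem zip_dropLast {α : Type} (xs ys : List α) (h : xs.length < ys.length) :
    List.zip xs ys.dropLast = List.zip xs ys := by
  induction xs generalizing ys with
  | nil => simp
  | cons x xs ih =>
    cases ys with
    | nil => simp at h
    | cons y ys =>
      cases ys with
      | nil => simp at h
      | cons z zs =>
        rw [List.dropLast_cons₂]
        simp only [List.zip_cons_cons]
        rw [ih (z :: zs) (by simp at h ⊢; omega)]

-- core invariant: A's loop from (a, b) equals zipping the chain fibsUpto N b a with its own tail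
theorem loop_eq_zip (N : Int) : ∀ (a b : Int) (hb : 0 < b) (hab : b < a),
    fibLoopA N a b hb hab =
      List.zip (fibsUpto N b a hb hab).tail (fibsUpto N b a hb hab) := by
  refine fibLoopA.induct N
    (motive := fun a b hb hab => fibLoopA N a b hb hab =
      List.zip (fibsUpto N b a hb hab).tail (fibsUpto N b a hb hab)) ?_ ?_
  · intro a b hb hab h ih
    rw [fibLoopA, fibsUpto, dif_pos h, dif_neg (by omega : ¬ a > N), if_pos hab]
    simp only [show b + a = a + b from add_comm b a]
    rw [ih]
    obtain ⟨t, ht⟩ := fibsUpto_head N a (a + b) (by omega) (by omega)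
    rw [ht]
    simp [List.zip]
  · intro a b hb hab h
    rw [fibLoopA, fibsUpto, dif_neg h, dif_pos (by omega : a > N)]
    simp

-- ===== VERDICT (by name: the statement is the Claim_ definition above) =====
theorem fibonacci_sets_spec : Claim_equal_fibonacci_sets := by
  intro N _
  show fibonacci_sets N = fibonacci_sets_alt N
  unfold fibonacci_sets fibonacci_sets_alt
  dsimp only
  rw [PySem.List.slice_from_one, PySem.List.slice_to_neg_one]
  rw [zip_dropLast _ _ (by
    obtain ⟨t, ht⟩ := fibsUpto_head N 1 2 (by norm_num) (by norm_num)
    rw [ht]; simp)]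
  exact loop_eq_zip N 2 1 (by norm_num) (by norm_num)
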